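-- pv_equiv track=rewrite | github.com/emilywei4/bioinformatics-portfolio | Pairwise Genetic Distance & Clustering/genome_rearrangements/two_break_distance.py | adjacency_edges
-- ===== SOURCE A (Python) =====
-- from typing import List, Dict, Iterable, Tuple
--
-- def gene_to_edge(gene: int) -> Tuple[int, int]:
--     """
--     Turn gene into directed edge form (tuple).
--     """
--     avGene = abs(gene) #absolute value of gene
--     if gene > 0:
--         return (2 * avGene - 1, 2 * avGene) #positive gene (tail, head) is represented as 2g-1 for tail and 2g for head
--     else:
--         return(2 * avGene, 2 * avGene - 1) #negative gene (tail, head) is represented as 2g for tail and 2g-1 for head (so we know when to reverse)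
--
-- def chromosome_to_nodes(chromosome: List[int]) -> List[int]:
--     """
--     Return order of directed edges (tail and head nodes) in graph.
--     """
--
--     nodes = []
--     for gene in chromosome:
--         tail, head = gene_to_edge(gene) #add gene to nodes in order
--         nodes.append(tail)
--         nodes.append(head)
--
--     return nodes
--
-- def adjacency_edges(chromosome: List[int]) -> List[Tuple[int, int]]:
--     """
--     Gives us the adjacency edges for a chromosome in a given genome.
--     """
--     nodes = chromosome_to_nodes(chromosome) #take in chromosome and convert to list of nodes
--     edges = []
--     length = len(nodes)
--     for i in range(0, length, 2): #loop through nodes in pairs because those represent directed edges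
--         iHead = nodes[i + 1] #get head of gene i
--         nextTail = nodes[(i + 2) % length] #get the tail of the next gene
--         edges.append((iHead, nextTail)) #connect them to make genome circular
--     return edges
-- ===== SOURCE B (Python) =====
-- from typing import List, Tuple
--
-- def _head(g: int) -> int:
--     return 2 * g if g > 0 else -2 * g - 1
--
-- def _tail(g: int) -> int:
--     return 2 * g - 1 if g > 0 else -2 * g
--
-- def adjacency_edges(chromosome: List[int]) -> List[Tuple[int, int]]:
--     if not chromosome:
--         return []
--     edges = []
--     prev = chromosome[0]
--     for g in chromosome[1:]:
--         edges.append((_head(prev), _tail(g)))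
--         prev = g
--     edges.append((_head(prev), _tail(chromosome[0])))
--     return edges
-- ===== Notes on version B (the rewrite author's own statement) =====
-- stated objective: simpler
-- what changed: B builds no intermediate structures at all: a single fused pass carries the previous gene and emits each (head(prev), tail(g)) edge directly from sign-based arithmetic formulas, closing the circle with the remembered first gene, instead of A flattening to a 2n node list and re-reading it with a stride-2 modulo index loop.
import Mathlib
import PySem

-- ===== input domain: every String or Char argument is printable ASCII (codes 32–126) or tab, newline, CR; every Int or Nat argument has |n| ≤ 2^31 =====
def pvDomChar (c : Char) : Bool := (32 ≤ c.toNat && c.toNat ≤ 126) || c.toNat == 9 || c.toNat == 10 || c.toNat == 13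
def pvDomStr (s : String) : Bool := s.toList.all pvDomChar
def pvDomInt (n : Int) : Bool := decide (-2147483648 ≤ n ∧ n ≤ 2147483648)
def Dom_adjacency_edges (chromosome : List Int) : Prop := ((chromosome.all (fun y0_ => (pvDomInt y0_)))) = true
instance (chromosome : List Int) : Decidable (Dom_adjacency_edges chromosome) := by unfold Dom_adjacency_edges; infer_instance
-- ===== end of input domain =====

-- B replaces A's flattened 2n node list and stride-2 modulo index loop by one fused pass that
-- carries the previous gene and emits each edge from direct sign-based formulas (objective: simpler).

-- ===== PORT A =====
def gene_to_edge (gene : Int) : Int × Int :=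
  let avGene := |gene|
  if gene > 0 then (2 * avGene - 1, 2 * avGene)
  else (2 * avGene, 2 * avGene - 1)

def chromosome_to_nodes (chromosome : List Int) : List Int :=
  chromosome.foldl (fun nodes gene =>
    let e := gene_to_edge gene
    nodes ++ [e.1, e.2]) []

def adjacency_edges (chromosome : List Int) : List (Int × Int) :=
  let nodes := chromosome_to_nodes chromosome
  let length : Int := nodes.length
  (PySem.List.pyRange 0 length 2).foldl (fun edges i =>
    let iHead := PySem.List.pyGetD nodes (i + 1) 0          -- in range for every loop index
    let nextTail := PySem.List.pyGetD nodes (PySem.Int.mod (i + 2) length) 0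
    edges ++ [(iHead, nextTail)]) []

-- ===== PORT B =====
def headB (g : Int) : Int := if g > 0 then 2 * g else -2 * g - 1

def tailB (g : Int) : Int := if g > 0 then 2 * g - 1 else -2 * g

def adjacency_edges_alt (chromosome : List Int) : List (Int × Int) :=
  match chromosome with
  | [] => []
  | first :: rest =>
    let st := rest.foldl (fun (st : List (Int × Int) × Int) g =>
      (st.1 ++ [(headB st.2, tailB g)], g)) (([] : List (Int × Int)), first)
    st.1 ++ [(headB st.2, tailB first)]

-- ===== PRECONDITION & SPEC =====
def Spec_adjacency_edges (chromosome : List Int) (out : List (Int × Int)) : Prop := out = adjacency_edges_alt chromosome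
instance (chromosome : List Int) (out : List (Int × Int)) : Decidable (Spec_adjacency_edges chromosome out) := by unfold Spec_adjacency_edges; infer_instance

-- ===== CLAIM (what is proved, stated in full; the proofs are below) =====
def Claim_equal_adjacency_edges : Prop := ∀ (chromosome : List Int), Dom_adjacency_edges chromosome → Spec_adjacency_edges chromosome (adjacency_edges chromosome)

-- ===== LEMMAS AND PROOFS =====

def nodeF (g : Int) : List Int := [(gene_to_edge g).1, (gene_to_edge g).2]

theorem headB_eq (g : Int) : headB g = (gene_to_edge g).2 := by
  unfold headB gene_to_edge
  split <;> rename_i h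
  · simp [abs_of_pos h]
  · simp [abs_of_nonpos (by omega : g ≤ 0)]

theorem tailB_eq (g : Int) : tailB g = (gene_to_edge g).1 := by
  unfold tailB gene_to_edge
  split <;> rename_i h
  · simp [abs_of_pos h]
  · simp [abs_of_nonpos (by omega : g ≤ 0)]

def goB (first prev : Int) (rest : List Int) : List (Int × Int) :=
  match rest with
  | [] => [(headB prev, tailB first)]
  | g :: t => (headB prev, tailB g) :: goB first g t

theorem foldB_eq (first : Int) (rest : List Int) : ∀ (acc : List (Int × Int)) (prev : Int),
    (let st := rest.foldl (fun (st : List (Int × Int) × Int) g =>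
        (st.1 ++ [(headB st.2, tailB g)], g)) (acc, prev)
     st.1 ++ [(headB st.2, tailB first)]) = acc ++ goB first prev rest := by
  induction rest with
  | nil => intro acc prev; simp [goB]
  | cons g t ih =>
    intro acc prev
    simpa [goB] using ih (acc ++ [(headB prev, tailB g)]) g

theorem goB_zip (first : Int) (rest : List Int) : ∀ (prev : Int),
    goB first prev rest =
      ((prev :: rest).map (fun x => (gene_to_edge x).2)).zip
        ((rest ++ [first]).map (fun x => (gene_to_edge x).1)) := by
  induction rest with
  | nil => intro prev; simp [goB, headB_eq, tailB_eq]
  | cons g t ih =>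
    intro prev
    simp [goB, headB_eq, tailB_eq, ih g]

theorem altB_zip (g : Int) (t : List Int) :
    adjacency_edges_alt (g :: t) =
      ((g :: t).map (fun x => (gene_to_edge x).2)).zip
        ((t ++ [g]).map (fun x => (gene_to_edge x).1)) := by
  have h := foldB_eq g t [] g
  simpa [adjacency_edges_alt, goB_zip g t g] using h

theorem nodes_eq (xs : List Int) : chromosome_to_nodes xs = xs.flatMap nodeF := by
  unfold chromosome_to_nodes
  suffices h : ∀ acc : List Int,
      xs.foldl (fun nodes gene => nodes ++ [(gene_to_edge gene).1, (gene_to_edge gene).2]) acc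
        = acc ++ xs.flatMap nodeF by
    simpa using h []
  induction xs with
  | nil => intro acc; simp
  | cons g t ih => intro acc; simp [nodeF, ih]

theorem flat_length (xs : List Int) : (xs.flatMap nodeF).length = 2 * xs.length := by
  induction xs with
  | nil => simp
  | cons g t ih => simp [nodeF, ih]; omega

theorem flat_getD_even (xs : List Int) (k : Nat) (d : Int) (hk : k < xs.length) :
    (xs.flatMap nodeF).getD (2 * k) d = (gene_to_edge xs[k]).1 := by
  induction xs generalizing k with
  | nil => simp at hk
  | cons g t ih =>
    cases k with
    | zero => simp [nodeF]
    | succ k =>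
      have h2 : 2 * (k + 1) = (2 * k) + 1 + 1 := by ring
      simp only [nodeF, List.flatMap_cons, h2, List.cons_append, List.nil_append,
        List.getD_cons_succ]
      have hk' : k < t.length := by simpa using hk
      simpa [nodeF] using ih k hk'

theorem flat_getD_odd (xs : List Int) (k : Nat) (d : Int) (hk : k < xs.length) :
    (xs.flatMap nodeF).getD (2 * k + 1) d = (gene_to_edge xs[k]).2 := by
  induction xs generalizing k with
  | nil => simp at hk
  | cons g t ih =>
    cases k with
    | zero => simp [nodeF]
    | succ k =>
      have h2 : 2 * (k + 1) + 1 = (2 * k + 1) + 1 + 1 := by ring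
      simp only [nodeF, List.flatMap_cons, h2, List.cons_append, List.nil_append,
        List.getD_cons_succ]
      have hk' : k < t.length := by simpa using hk
      simpa [nodeF] using ih k hk'

theorem adjA_eq_map (xs : List Int) :
    adjacency_edges xs = (List.range xs.length).map (fun (k : Nat) =>
      (PySem.List.pyGetD (xs.flatMap nodeF) ((0 + 2 * (k : Int)) + 1) 0,
       PySem.List.pyGetD (xs.flatMap nodeF)
         (PySem.Int.mod ((0 + 2 * (k : Int)) + 2) ((2 * xs.length : Nat) : Int)) 0)) := by
  unfold adjacency_edges
  rw [nodes_eq]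
  rw [PySem.List.foldl_append_singleton_eq_map]
  rw [PySem.List.pyRange_of_pos 0 (((xs.flatMap nodeF).length : Nat) : Int) (by norm_num)]
  rw [flat_length]
  have harg : (if (0:Int) < (((2 * xs.length : Nat) : Int)) then
      ((((2 * xs.length : Nat) : Int)) - 0 + 2 - 1) / 2 |>.toNat else 0) = xs.length := by
    split <;> omega
  rw [harg]
  simp [Function.comp_def]

theorem main_eq (xs : List Int) : adjacency_edges xs = adjacency_edges_alt xs := by
  rcases xs with _ | ⟨g, t⟩
  · rfl
  rw [altB_zip g t, adjA_eq_map]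
  have hn : 0 < (g :: t).length := by simp
  apply List.ext_getElem
  · simp
  intro k hk1 hk2
  have hkn : k < (g :: t).length := by simpa using hk1
  rw [List.getElem_map, List.getElem_range, List.getElem_zip]
  have hfst : PySem.List.pyGetD ((g :: t).flatMap nodeF) ((0 + 2 * ((k:Nat) : Int)) + 1) 0
      = (gene_to_edge (g :: t)[k]).2 := by
    have hcast : (0 + 2 * ((k:Nat) : Int)) + 1 = ((2 * k + 1 : Nat) : Int) := by push_cast; ring
    rw [hcast, PySem.List.pyGetD_natCast]
    exact flat_getD_odd (g :: t) k 0 hkn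
  have hmod : PySem.Int.mod ((0 + 2 * ((k:Nat) : Int)) + 2) ((2 * (g :: t).length : Nat) : Int)
      = ((2 * ((k + 1) % (g :: t).length) : Nat) : Int) := by
    rw [PySem.Int.mod_eq_emod_of_pos (by exact_mod_cast Nat.mul_pos (by norm_num) hn)]
    have hcast : (0 + 2 * ((k:Nat) : Int)) + 2 = ((2 * (k + 1) : Nat) : Int) := by push_cast; ring
    rw [hcast]
    have hmm := Nat.mul_mod_mul_left 2 (k + 1) (g :: t).length
    exact_mod_cast congrArg (Nat.cast : Nat → Int) hmm
  have hk1n : (k + 1) % (g :: t).length < (g :: t).length := Nat.mod_lt _ hn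
  have hsnd : PySem.List.pyGetD ((g :: t).flatMap nodeF)
        (PySem.Int.mod ((0 + 2 * ((k:Nat) : Int)) + 2) ((2 * (g :: t).length : Nat) : Int)) 0
      = (gene_to_edge (g :: t)[(k + 1) % (g :: t).length]).1 := by
    rw [hmod, PySem.List.pyGetD_natCast]
    exact flat_getD_even (g :: t) ((k + 1) % (g :: t).length) 0 hk1n
  have hB1 : ((g :: t).map (fun x => (gene_to_edge x).2))[k]'(by simpa using hkn)
      = (gene_to_edge (g :: t)[k]).2 := by rw [List.getElem_map]
  have hB2 : ((t ++ [g]).map (fun x => (gene_to_edge x).1))[k]'(by simp at hkn ⊢; omega)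
      = (gene_to_edge (g :: t)[(k + 1) % (g :: t).length]).1 := by
    rw [List.getElem_map]
    by_cases hlt : k < t.length
    · rw [List.getElem_append_left hlt]
      have hm : (k + 1) % (t.length + 1) = k + 1 := Nat.mod_eq_of_lt (by omega)
      simp only [List.length_cons, hm, List.getElem_cons_succ]
    · have hkeq : k = t.length := by simp at hkn; omega
      rw [List.getElem_append_right (by omega)]
      subst hkeq
      have hm : (t.length + 1) % (t.length + 1) = 0 := Nat.mod_self _
      simp only [List.length_cons, hm]
      simp
  rw [hfst, hsnd]
  exact (Prod.ext hB1 hB2).symm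

-- ===== VERDICT (by name: the statement is the Claim_ definition above) =====
theorem adjacency_edges_spec : Claim_equal_adjacency_edges := by
  intro xs _
  unfold Spec_adjacency_edges
  exact main_eq xs
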